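-- pv_equiv track=rewrite | github.com/cbass2404/bottega_homework | day18/challenge_two.py | string_sorter
-- ===== SOURCE A (Python) =====
-- def string_sorter(string):
--     alpha_list = []
--     for L in string:
--         if L.isalpha():
--             alpha_list.append(L.lower())
--         else:
--             pass
--     return ''.join(map(str, sorted(alpha_list)))
-- ===== SOURCE B (Python) =====
-- def string_sorter(string):
--     counts = [0] * 26
--     for c in string:
--         if c.isalpha():
--             i = ord(c.lower()) - 97
--             counts[i] = counts[i] + 1
--     return ''.join(chr(97 + i) * n for i, n in enumerate(counts))
-- ===== Notes on version B (the rewrite author's own statement) =====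
-- stated objective: faster
-- what changed: replaces building a list of lowered letters and sorting it with a one-pass counting sort over 26 letter buckets emitted in order
import Mathlib
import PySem

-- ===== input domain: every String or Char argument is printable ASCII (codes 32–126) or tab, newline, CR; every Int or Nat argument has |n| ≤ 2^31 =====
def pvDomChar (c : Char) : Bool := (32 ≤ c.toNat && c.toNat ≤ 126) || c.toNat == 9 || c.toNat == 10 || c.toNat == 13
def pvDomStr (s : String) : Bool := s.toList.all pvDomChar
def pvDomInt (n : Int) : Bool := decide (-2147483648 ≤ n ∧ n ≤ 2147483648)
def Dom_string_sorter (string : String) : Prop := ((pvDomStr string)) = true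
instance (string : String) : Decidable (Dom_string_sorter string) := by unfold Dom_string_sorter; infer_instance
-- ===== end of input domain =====

-- B replaces "collect the lowered letters, then comparison-sort them" with a one-pass counting sort
-- over 26 letter buckets emitted in order; the return values are proved equal.

-- ===== PORT A =====
-- sorted(alpha_list) sorts single-character ASCII strings, which orders exactly like the chars
-- themselves; ''.join(map(str, ...)) over those one-char strings is String.ofList of the char list.
def string_sorter (string : String) : String :=
  let alpha_list := string.toList.foldl
    (fun acc L => if PySem.Chars.isalpha L then acc ++ [PySem.Chars.lowerChar L] else acc) []
  String.ofList (PySem.List.sorted alpha_list (fun x => x) false)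

-- ===== PORT B =====
-- counts[i] = counts[i] + 1 is counts.set i.toNat (pyGetD counts i 0 + 1); the index
-- i = ord(c.lower()) - 97 is a nonnegative in-range int whenever c.isalpha() is true, so this is
-- exact; chr(k) for 97 ≤ k ≤ 122 is Char.ofNat k (exact there); ''.join over the generator of the
-- 26 repeated-letter strings is the flattened list of the 26 blocks.
def string_sorter_alt (string : String) : String :=
  let counts := string.toList.foldl
    (fun counts c =>
      if PySem.Chars.isalpha c then
        let i : Int := ((PySem.Chars.lowerChar c).toNat : Int) - 97
        counts.set i.toNat (PySem.List.pyGetD counts i 0 + 1)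
      else counts)
    (List.replicate 26 (0 : Int))
  String.ofList (((PySem.List.enumerate counts 0).map
    (fun p => List.replicate p.2.toNat (Char.ofNat (97 + p.1).toNat))).flatten)

-- ===== PRECONDITION & SPEC =====
def Spec_string_sorter (string : String) (out : String) : Prop := out = string_sorter_alt string
instance (string : String) (out : String) : Decidable (Spec_string_sorter string out) := by unfold Spec_string_sorter; infer_instance

-- ===== CLAIM (what is proved, stated in full; the proofs are below) =====
def Claim_equal_string_sorter : Prop := ∀ (string : String), Dom_string_sorter string → Spec_string_sorter string (string_sorter string)

-- ===== LEMMAS AND PROOFS =====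

-- the lowered letters of cs, in order (what A's loop collects)
def pvLows (cs : List Char) : List Char :=
  (cs.filter PySem.Chars.isalpha).map PySem.Chars.lowerChar

-- the 26 buckets of B, concatenated
def pvBkts (L : List Char) (n : Nat) : List Char :=
  ((List.range n).map (fun i => List.replicate (L.count (Char.ofNat (97 + i))) (Char.ofNat (97 + i)))).flatten

theorem pvCharLe_iff (a c : Char) : (a ≤ c) ↔ (a.toNat ≤ c.toNat) := by
  rw [Char.le_def, UInt32.le_iff_toNat_le]; rfl

theorem pvLower_code {c : Char} (h : PySem.Chars.isalpha c = true) :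
    97 ≤ (PySem.Chars.lowerChar c).toNat ∧ (PySem.Chars.lowerChar c).toNat ≤ 122 := by
  have eA : ('A' : Char).toNat = 65 := rfl
  have eZ : ('Z' : Char).toNat = 90 := rfl
  have ea : ('a' : Char).toNat = 97 := rfl
  have ez : ('z' : Char).toNat = 122 := rfl
  simp only [PySem.Chars.isalpha, PySem.Chars.isupper, PySem.Chars.islower, Bool.or_eq_true,
    Bool.and_eq_true, decide_eq_true_eq, pvCharLe_iff, eA, eZ, ea, ez] at h
  rcases h with ⟨h1, h2⟩ | ⟨h1, h2⟩
  · have hu : PySem.Chars.isupper c = true := by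
      simp only [PySem.Chars.isupper, Bool.and_eq_true, decide_eq_true_eq, pvCharLe_iff, eA, eZ]
      omega
    have hv : (c.toNat + 32).isValidChar := Or.inl (by omega)
    simp [PySem.Chars.lowerChar, hu, Char.toNat_ofNat, hv]
    omega
  · have hu : PySem.Chars.isupper c = false := by
      simp only [PySem.Chars.isupper, Bool.and_eq_false_iff, decide_eq_false_iff_not, pvCharLe_iff,
        eA, eZ]
      omega
    simp [PySem.Chars.lowerChar, hu]
    omega

theorem pvMem_lows_code {cs : List Char} {d : Char} (h : d ∈ pvLows cs) :
    97 ≤ d.toNat ∧ d.toNat ≤ 122 := by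
  simp only [pvLows, List.mem_map, List.mem_filter] at h
  obtain ⟨c, ⟨-, hc⟩, rfl⟩ := h
  exact pvLower_code hc

theorem pvOfNat_toNat {m : Nat} (hm : m < 55296) {d : Char} :
    (Char.ofNat m = d) ↔ d.toNat = m := by
  constructor
  · rintro rfl; simp [Char.toNat_ofNat, Nat.isValidChar, hm]
  · rintro rfl; exact Char.ofNat_toNat d

theorem pvCount_bkts (L : List Char) (n : Nat) (hn : n ≤ 26) (d : Char) :
    (pvBkts L n).count d =
      if 97 ≤ d.toNat ∧ d.toNat < 97 + n then L.count d else 0 := by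
  induction n with
  | zero => simp [pvBkts]
  | succ n ih =>
    have hn' : n ≤ 26 := Nat.le_of_succ_le hn
    have hv : 97 + n < 55296 := by omega
    have heq : Char.ofNat (97 + n) = d ↔ d.toNat = 97 + n := pvOfNat_toNat hv
    simp only [pvBkts, List.range_succ, List.map_append, List.flatten_append] at *
    rw [List.count_append, ih hn']
    simp only [List.map_cons, List.map_nil, List.flatten_cons, List.flatten_nil, List.append_nil,
      List.count_replicate]
    simp only [beq_iff_eq]
    by_cases hd : d.toNat = 97 + n
    · rw [if_pos (heq.mpr hd), heq.mpr hd]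
      have hb' : ¬(97 ≤ d.toNat ∧ d.toNat < 97 + n) := by omega
      rw [if_neg hb', if_pos (by omega)]
      omega
    · rw [if_neg (fun h => hd (heq.mp h)), Nat.add_zero]
      split_ifs with h1 h2 <;> first | rfl | omega

theorem pvPairwise_bkts (L : List Char) (n : Nat) (hn : n ≤ 26) :
    (pvBkts L n).Pairwise (· ≤ ·) := by
  rw [pvBkts, List.pairwise_flatten]
  constructor
  · intro l hl
    simp only [List.mem_map, List.mem_range] at hl
    obtain ⟨i, -, rfl⟩ := hl
    exact List.pairwise_replicate.mpr (Or.inr le_rfl)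
  · rw [List.pairwise_map]
    refine List.Pairwise.imp_of_mem ?_ List.pairwise_lt_range
    intro i j hi hj hij x hx y hy
    simp only [List.mem_range] at hi hj
    rw [List.eq_of_mem_replicate hx, List.eq_of_mem_replicate hy, pvCharLe_iff]
    rw [Char.toNat_ofNat, Char.toNat_ofNat]
    simp only [if_pos (Or.inl (by omega : 97 + i < 55296) : (97 + i).isValidChar),
      if_pos (Or.inl (by omega : 97 + j < 55296) : (97 + j).isValidChar)]
    omega

theorem pvSorted_eq_bkts (L : List Char)
    (hL : ∀ d ∈ L, 97 ≤ d.toNat ∧ d.toNat ≤ 122) :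
    PySem.List.sorted L (fun x => x) false = pvBkts L 26 := by
  apply PySem.List.sorted_id_eq_of_perm_of_pairwise
  · rw [List.perm_iff_count]
    intro d
    rw [pvCount_bkts L 26 le_rfl d]
    by_cases hd : 97 ≤ d.toNat ∧ d.toNat < 97 + 26
    · simp [hd]
    · rw [if_neg hd]
      exact ((List.count_eq_zero).mpr (fun hmem => hd (by have := hL d hmem; omega))).symm
  · exact pvPairwise_bkts L 26 le_rfl

theorem pvSet_map_range {n : Nat} (g : Nat → Int) (m : Nat) (v : Int) :
    ((List.range n).map g).set m v
      = (List.range n).map (fun j => if j = m then v else g j) := by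
  apply List.ext_getElem
  · simp
  · intro i h1 h2
    simp only [List.getElem_set, List.getElem_map, List.getElem_range]
    split_ifs with h h' <;> first | rfl | omega

theorem pvFold_counts (cs : List Char) (g : Nat → Int) :
    cs.foldl
      (fun counts c =>
        if PySem.Chars.isalpha c then
          let i : Int := ((PySem.Chars.lowerChar c).toNat : Int) - 97
          counts.set i.toNat (PySem.List.pyGetD counts i 0 + 1)
        else counts)
      ((List.range 26).map g)
    = (List.range 26).map (fun i => g i + ((pvLows cs).count (Char.ofNat (97 + i)) : Int)) := by
  induction cs generalizing g with
  | nil => simp [pvLows]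
  | cons c cs ih =>
    by_cases hc : PySem.Chars.isalpha c = true
    · have hb := pvLower_code hc
      set m : Nat := (PySem.Chars.lowerChar c).toNat - 97 with hm
      have hlow : pvLows (c :: cs) = PySem.Chars.lowerChar c :: pvLows cs := by
        simp [pvLows, hc]
      have hi : (((PySem.Chars.lowerChar c).toNat : Int) - 97) = (m : Int) := by omega
      rw [List.foldl_cons]
      simp only [hc, if_true, hi, Int.toNat_natCast, PySem.List.pyGetD_natCast]
      have hget : ((List.range 26).map g).getD m 0 = g m := by
        rw [List.getD_eq_getElem?_getD]
        simp [(by omega : m < 26)]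
      rw [hget, pvSet_map_range g m (g m + 1), ih]
      apply List.map_congr_left
      intro i himem
      simp only [List.mem_range] at himem
      rw [hlow, List.count_cons]
      have hv : 97 + i < 55296 := by omega
      by_cases hii : i = m
      · have hcm : Char.ofNat (97 + i) = PySem.Chars.lowerChar c := (pvOfNat_toNat hv).mpr (by omega)
        have hbt : (PySem.Chars.lowerChar c == Char.ofNat (97 + i)) = true := by
          rw [beq_iff_eq]; exact hcm.symm
        rw [hii] at hbt
        simp only [hii, hbt, if_true]
        push_cast
        ring
      · have hbf : (PySem.Chars.lowerChar c == Char.ofNat (97 + i)) = false := by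
          rw [beq_eq_false_iff_ne]
          intro h
          have := (pvOfNat_toNat hv).mp h.symm
          omega
        simp [hii, hbf]
    · rw [List.foldl_cons]
      simp only [hc]
      rw [if_neg (by simp), ih]
      have : pvLows (c :: cs) = pvLows cs := by simp [pvLows, hc]
      rw [this]

theorem pvEnum_map_range (g : Nat → Int) (n : Nat) (s : Int) :
    PySem.List.enumerate ((List.range n).map g) s
      = (List.range n).map (fun (i : Nat) => ((s + i : Int), g i)) := by
  induction n generalizing s with
  | zero => simp
  | succ n ih =>
    rw [List.range_succ, List.map_append, PySem.List.enumerate_append, ih, List.map_append]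
    simp [PySem.List.enumerate]

-- B's final join, expressed over the closed-form counts, is exactly the bucket list
theorem pvJoin_eq_bkts (L : List Char) :
    ((PySem.List.enumerate
        ((List.range 26).map (fun i => (L.count (Char.ofNat (97 + i)) : Int))) 0).map
      (fun p => List.replicate p.2.toNat (Char.ofNat (97 + p.1).toNat))).flatten
    = pvBkts L 26 := by
  rw [pvEnum_map_range, List.map_map, pvBkts]
  refine congrArg List.flatten (List.map_congr_left ?_)
  intro i hi
  simp only [List.mem_range] at hi
  simp only [Function.comp_apply, Int.toNat_natCast]
  have h97 : ((97 : Int) + (0 + (i : Nat))).toNat = 97 + i := by omega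
  rw [h97]

-- ===== VERDICT (by name: the statement is the Claim_ definition above) =====
theorem string_sorter_spec : Claim_equal_string_sorter := by
  intro s _
  unfold Spec_string_sorter string_sorter string_sorter_alt
  rw [PySem.List.foldl_append_if]
  have h0 : (List.replicate 26 (0 : Int)) = (List.range 26).map (fun _ => (0 : Int)) := by decide
  rw [h0, pvFold_counts]
  simp only [List.nil_append, zero_add]
  rw [show ((s.toList.filter PySem.Chars.isalpha).map PySem.Chars.lowerChar) = pvLows s.toList from rfl]
  rw [pvJoin_eq_bkts, pvSorted_eq_bkts _ (fun d hd => pvMem_lows_code hd)]
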